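-- pv_equiv track=rewrite | github.com/dlekdlsll/Programmers | weekly_1.py | solution
-- ===== SOURCE A (Python) =====
-- def solution(price, money, count):
--     fare = 0
--     for i in range(1,count+1):
--         price_multiple = price*i
--         fare = fare + price_multiple
--     if money - fare > 0:
--         answer = 0
--     else:
--         answer = fare - money
--     return answer
-- ===== SOURCE B (Python) =====
-- def solution(price, money, count):
--     # closed-form arithmetic series instead of a loop; rides = max(count, 0)
--     m = max(count, 0)
--     fare = price * (m * (m + 1) // 2)
--     return max(0, fare - money)
-- ===== Notes on version B (the rewrite author's own statement) =====
-- stated objective: faster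
-- what changed: Replaces the O(count) summation loop by the closed-form triangular-number formula price*count*(count+1)//2 and the if/else by max(0, fare-money).
import Mathlib
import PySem

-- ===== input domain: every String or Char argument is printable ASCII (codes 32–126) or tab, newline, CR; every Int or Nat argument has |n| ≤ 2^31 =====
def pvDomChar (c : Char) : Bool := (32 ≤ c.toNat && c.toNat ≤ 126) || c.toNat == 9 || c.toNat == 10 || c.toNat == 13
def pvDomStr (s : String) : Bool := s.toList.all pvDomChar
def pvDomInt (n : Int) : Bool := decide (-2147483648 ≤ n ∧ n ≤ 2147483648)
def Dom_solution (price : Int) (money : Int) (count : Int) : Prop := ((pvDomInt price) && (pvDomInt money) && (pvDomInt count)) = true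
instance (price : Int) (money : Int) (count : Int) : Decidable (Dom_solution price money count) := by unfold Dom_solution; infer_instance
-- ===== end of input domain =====

-- B replaces A's O(count) summation loop by the closed-form triangular formula (O(1)).


-- ===== PORT A =====
-- for i in range(1, count+1): fare += price*i ; then the if/else
def solution (price : Int) (money : Int) (count : Int) : Int :=
  let fare := (PySem.List.pyRange 1 (count + 1) 1).foldl (fun fare i => fare + price * i) 0
  if money - fare > 0 then 0 else fare - money

-- ===== PORT B =====
-- closed form: m = max(count, 0); fare = price * (m*(m+1)//2); max(0, fare - money)
def solution_alt (price : Int) (money : Int) (count : Int) : Int :=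
  let m := max count 0
  let fare := price * (PySem.Int.floordiv (m * (m + 1)) 2)
  max 0 (fare - money)

-- ===== PRECONDITION & SPEC =====
def Spec_solution (price : Int) (money : Int) (count : Int) (out : Int) : Prop := out = solution_alt price money count
instance (price : Int) (money : Int) (count : Int) (out : Int) : Decidable (Spec_solution price money count out) := by unfold Spec_solution; infer_instance

-- ===== CLAIM (what is proved, stated in full; the proofs are below) =====
def Claim_equal_solution : Prop := ∀ (price : Int) (money : Int) (count : Int), Dom_solution price money count → Spec_solution price money count (solution price money count)

-- ===== LEMMAS AND PROOFS =====

-- twice the loop's sum is price * n * (n+1), proved without division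
theorem pv_foldl_double (price : Int) (n : Nat) :
    2 * ((PySem.List.pyRange 1 ((n : Int) + 1) 1).foldl (fun fare i => fare + price * i) 0)
      = price * ((n : Int) * ((n : Int) + 1)) := by
  induction n with
  | zero => simp [PySem.List.pyRange_one_eq_nil]
  | succ k ih =>
    have hsplit : PySem.List.pyRange 1 ((↑(k + 1) : Int) + 1) 1
        = PySem.List.pyRange 1 ((k : Int) + 1) 1 ++ [(k : Int) + 1] := by
      have := PySem.List.pyRange_one_succ_right (a := 1) (b := (k : Int) + 1) (by omega)
      push_cast
      exact this
    rw [hsplit, List.foldl_append]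
    simp only [List.foldl_cons, List.foldl_nil]
    push_cast
    ring_nf
    ring_nf at ih
    omega

theorem pv_fare_eq (price : Int) (count : Int) :
    (PySem.List.pyRange 1 (count + 1) 1).foldl (fun fare i => fare + price * i) 0
      = price * (PySem.Int.floordiv ((max count 0) * ((max count 0) + 1)) 2) := by
  rw [PySem.Int.floordiv_eq_ediv_of_pos (by norm_num)]
  rcases le_or_gt count 0 with hc | hc
  · rw [PySem.List.pyRange_one_eq_nil (by omega)]
    have hm : max count 0 = 0 := by omega
    simp [hm]
  · have hm : max count 0 = count := by omega
    rw [hm]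
    have hn : count = ((count.toNat : Int)) := by omega
    rw [hn]
    have h2 := pv_foldl_double price count.toNat
    have heven : Even ((count.toNat : Int) * ((count.toNat : Int) + 1)) :=
      Int.even_mul_succ_self _
    obtain ⟨k, hk⟩ := heven
    rw [hk] at h2 ⊢
    have hk2 : k + k = 2 * k := by ring
    rw [hk2] at h2 ⊢
    rw [Int.mul_ediv_cancel_left k (by norm_num)]
    have hlin : price * (2 * k) = 2 * (price * k) := by ring
    omega

-- ===== VERDICT (by name: the statement is the Claim_ definition above) =====
theorem solution_spec : Claim_equal_solution := by
  intro price money count _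
  unfold Spec_solution solution solution_alt
  simp only
  rw [pv_fare_eq]
  set f := price * (PySem.Int.floordiv ((max count 0) * ((max count 0) + 1)) 2)
  split_ifs with h <;> omega
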